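-- pv_equiv track=rewrite | github.com/mvasinek/olgen-om-error-prediction | camera.py | imageToDist
-- ===== SOURCE A (Python) =====
-- def imageToDist(pi):
--     d = []
--     for c_id in range(len(pi)):
--         d_chrom = []
--         chromosome = pi[c_id]
--
--         #find first non/zero entry
--         start_pos = 0
--         for i in range(len(chromosome)):
--             if chromosome[i] != 0:
--                 start_pos = i
--                 break
--
--         #compute all distances
--         last_pos = start_pos
--         for i in range(start_pos+1, len(chromosome)):
--             if chromosome[i] != 0:
--                 d_chrom.append(int(i - last_pos))
--                 last_pos = i
--
--         d.append(d_chrom)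
--
--     return d
-- ===== SOURCE B (Python) =====
-- def imageToDist(pi):
--     d = []
--     for chromosome in pi:
--         pos = [i for i, v in enumerate(chromosome) if v != 0]
--         d.append([int(b - a) for a, b in zip(pos, pos[1:])])
--     return d
-- ===== Notes on version B (the rewrite author's own statement) =====
-- stated objective: simpler
-- what changed: Replaces A's fused single loop (find-first-nonzero with break, then a running last_pos guard loop) by two declarative passes per chromosome: collect the nonzero index positions, then pairwise-difference them with zip.
import Mathlib
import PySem

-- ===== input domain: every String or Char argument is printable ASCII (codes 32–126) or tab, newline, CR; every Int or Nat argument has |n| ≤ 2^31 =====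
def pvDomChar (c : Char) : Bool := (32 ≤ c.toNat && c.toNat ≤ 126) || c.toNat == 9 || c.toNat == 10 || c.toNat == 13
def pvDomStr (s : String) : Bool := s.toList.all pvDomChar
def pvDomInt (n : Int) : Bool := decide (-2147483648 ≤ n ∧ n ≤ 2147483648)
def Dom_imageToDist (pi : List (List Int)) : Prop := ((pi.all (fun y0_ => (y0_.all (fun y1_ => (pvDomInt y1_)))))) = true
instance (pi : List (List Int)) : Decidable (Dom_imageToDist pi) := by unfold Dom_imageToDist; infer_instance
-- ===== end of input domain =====

-- B replaces A's fused find-first-nonzero + running-last_pos loop by a positions list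
-- followed by pairwise differences (simpler decomposition; return value proved equal).

-- ===== PORT A =====
-- 'for i in range(len(chromosome)): if chromosome[i] != 0: start_pos = i; break'
def pvAFind (c : List Int) : List Int → Int
  | [] => 0
  | i :: rest => if PySem.List.pyGetD c i 0 ≠ 0 then i else pvAFind c rest

-- 'for i in range(start_pos+1, len(chromosome)): if chromosome[i] != 0: append(i-last); last=i'
def pvALoop (c : List Int) : List Int → Int → List Int → List Int
  | [], _, acc => acc
  | i :: rest, last, acc =>
      if PySem.List.pyGetD c i 0 ≠ 0 then pvALoop c rest i (acc ++ [i - last])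
      else pvALoop c rest last acc

def pvAChrom (c : List Int) : List Int :=
  let startPos := pvAFind c (PySem.List.pyRange 0 (c.length : Int) 1)
  pvALoop c (PySem.List.pyRange (startPos + 1) (c.length : Int) 1) startPos []

def imageToDist (pi : List (List Int)) : List (List Int) :=
  (PySem.List.pyRange 0 (pi.length : Int) 1).foldl
    (fun d cid => d ++ [pvAChrom (PySem.List.pyGetD pi cid [])]) []

-- ===== PORT B =====
def pvBPos (c : List Int) : List Int :=
  (PySem.List.enumerate c 0).filterMap (fun p => if p.2 ≠ 0 then some p.1 else none)

def pvBChrom (c : List Int) : List Int :=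
  let pos := pvBPos c
  List.zipWith (fun a b => b - a) pos pos.tail

def imageToDist_alt (pi : List (List Int)) : List (List Int) := pi.map pvBChrom

-- ===== PRECONDITION & SPEC =====
def Spec_imageToDist (pi : List (List Int)) (out : List (List Int)) : Prop := out = imageToDist_alt pi
instance (pi : List (List Int)) (out : List (List Int)) : Decidable (Spec_imageToDist pi out) := by unfold Spec_imageToDist; infer_instance

-- ===== CLAIM (what is proved, stated in full; the proofs are below) =====
def Claim_equal_imageToDist : Prop := ∀ (pi : List (List Int)), Dom_imageToDist pi → Spec_imageToDist pi (imageToDist pi)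

-- ===== LEMMAS AND PROOFS =====

-- consecutive differences with a running "last" value
def pvDiffs (last : Int) : List Int → List Int
  | [] => []
  | i :: rest => (i - last) :: pvDiffs i rest

theorem pvZipWith_diffs (t : List Int) : ∀ a : Int,
    List.zipWith (fun a b => b - a) (a :: t) t = pvDiffs a t := by
  induction t with
  | nil => intro a; simp [pvDiffs]
  | cons x t' ih => intro a; simp [pvDiffs, ih x]

theorem pvAFind_eq (c : List Int) : ∀ idxs : List Int,
    pvAFind c idxs = ((idxs.filter (fun i => PySem.List.pyGetD c i 0 != 0)).headD 0) := by
  intro idxs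
  induction idxs with
  | nil => simp [pvAFind]
  | cons i rest ih =>
      by_cases h : PySem.List.pyGetD c i 0 ≠ 0 <;>
        simp [pvAFind, h, ih]

theorem pvALoop_eq (c : List Int) : ∀ (idxs : List Int) (last : Int) (acc : List Int),
    pvALoop c idxs last acc = acc ++ pvDiffs last (idxs.filter (fun i => PySem.List.pyGetD c i 0 != 0)) := by
  intro idxs
  induction idxs with
  | nil => intro last acc; simp [pvALoop, pvDiffs]
  | cons i rest ih =>
      intro last acc
      by_cases h : PySem.List.pyGetD c i 0 ≠ 0
      · simp [pvALoop, h, ih, pvDiffs]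
      · simp [pvALoop, h, ih]

theorem pvFilterMap_if (c : List Int) : ∀ l : List Int,
    l.filterMap (fun j => if PySem.List.pyGetD c j 0 ≠ 0 then some j else none)
      = l.filter (fun i => PySem.List.pyGetD c i 0 != 0) := by
  intro l
  induction l with
  | nil => rfl
  | cons j t ih =>
      rw [List.filterMap_cons, List.filter_cons]
      rcases eq_or_ne (PySem.List.pyGetD c j 0) 0 with h | h
      · rw [if_neg (by simp [h]), if_neg (by simp [h])]; exact ih
      · rw [if_pos h, if_pos (by simp [h])]
        exact congrArg (j :: ·) ih

theorem pvBPos_eq (c : List Int) :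
    pvBPos c = (PySem.List.pyRange 0 (c.length : Int) 1).filter (fun i => PySem.List.pyGetD c i 0 != 0) := by
  unfold pvBPos
  rw [PySem.List.enumerate_eq_map_pyRange (d := 0)]
  rw [List.filterMap_map]
  have hfun : ((fun p : Int × Int => if p.2 ≠ 0 then some p.1 else none) ∘ fun j => (j, PySem.List.pyGetD c j 0))
      = fun j => if PySem.List.pyGetD c j 0 ≠ 0 then some j else none := by
    funext j; simp [Function.comp]
  rw [hfun, pvFilterMap_if]
  simp [PySem.List.len]

-- splitting the filtered range at its first element
theorem pvFilter_range_split (Pb : Int → Bool) (b : Int) :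
    ∀ (n : Nat) (a : Int), (b - a).toNat = n →
    ∀ (p : Int) (rest : List Int),
      (PySem.List.pyRange a b 1).filter Pb = p :: rest →
      (PySem.List.pyRange (p + 1) b 1).filter Pb = rest := by
  intro n
  induction n with
  | zero =>
      intro a hn p rest h
      rw [PySem.List.pyRange_one_eq_nil (by omega)] at h
      simp at h
  | succ m ih =>
      intro a hn p rest h
      have hab : a < b := by omega
      rw [PySem.List.pyRange_one_cons hab] at h
      by_cases hPa : Pb a
      · rw [List.filter_cons_of_pos hPa] at h
        obtain ⟨rfl, hrest⟩ := List.cons.inj h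
        exact hrest.symm ▸ rfl
      · rw [List.filter_cons_of_neg hPa] at h
        exact ih (a + 1) (by omega) p rest h

theorem pvChrom_eq (c : List Int) : pvAChrom c = pvBChrom c := by
  unfold pvAChrom pvBChrom
  rw [pvBPos_eq]
  set Pb : Int → Bool := fun i => PySem.List.pyGetD c i 0 != 0 with hPb
  rcases hF : (PySem.List.pyRange 0 (c.length : Int) 1).filter Pb with _ | ⟨p, rest⟩
  · -- no nonzero entry: start_pos = 0, both sides empty
    rw [pvAFind_eq, hF]
    simp only [List.headD]
    rw [pvALoop_eq]
    have h1 : (PySem.List.pyRange (0 + 1) (c.length : Int) 1).filter Pb = [] := by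
      by_cases hc : (0 : Int) < (c.length : Int)
      · rw [PySem.List.pyRange_one_cons hc] at hF
        rcases hPa : Pb 0 with _ | _
        · rw [List.filter_cons_of_neg (by simp [hPa])] at hF; exact hF
        · rw [List.filter_cons_of_pos hPa] at hF; simp at hF
      · rw [PySem.List.pyRange_one_eq_nil (by omega)]; simp
    rw [h1]
    simp [pvDiffs]
  · rw [pvAFind_eq, hF]
    simp only [List.headD]
    rw [pvALoop_eq]
    rw [pvFilter_range_split Pb (c.length : Int) ((c.length : Int) - 0).toNat 0 rfl p rest hF]
    simp only [List.nil_append, List.tail_cons]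
    exact (pvZipWith_diffs rest p).symm

theorem pvFoldl_append_map (f : List Int → List Int) :
    ∀ (l : List (List Int)) (acc : List (List Int)),
      l.foldl (fun d c => d ++ [f c]) acc = acc ++ l.map f := by
  intro l
  induction l with
  | nil => intro acc; simp
  | cons x t ih => intro acc; simp [ih]

-- ===== VERDICT (by name: the statement is the Claim_ definition above) =====
theorem imageToDist_spec : Claim_equal_imageToDist := by
  intro pi _
  unfold Spec_imageToDist imageToDist imageToDist_alt
  rw [PySem.List.foldl_pyRange_zero_pyGetD' pi [] (fun d c => d ++ [pvAChrom c]) []]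
  rw [pvFoldl_append_map]
  simp only [List.nil_append]
  exact List.map_congr_left (fun c _ => pvChrom_eq c)
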